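-- pv_equiv track=rewrite | github.com/progremming/baekjoon | 프로그래머스/1/134240. 푸드 파이트 대회/푸드 파이트 대회.py | solution
-- ===== SOURCE A (Python) =====
-- def solution(food):
--     head = []
--     footer = []
--
--     index = 0
--
--     for i in food:
--         if i <= 1:
--             index +=1
--             pass
--         elif i % 2 == 1:
--             i  = i - 1
--             for z in range(i//2):
--                 head.append(index)
--                 footer.append(index)
--             index += 1
--         else:
--             for z in range(i//2):
--                 head.append(index)
--                 footer.append(index)
--             index += 1
--
--     head.append(0)
--     c = reversed(footer)
--     for i in c:
--         head.append(i)
--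
--     result = ''.join(map(str, head))
--
--
--     return result
-- ===== SOURCE B (Python) =====
-- def solution(food):
--     # Build the palindrome inside-out: start from the central '0' and wrap it
--     # with str(i)*(food[i]//2) on both sides, processing indices from last to first.
--     res = '0'
--     i = len(food) - 1
--     for x in reversed(food):
--         half = str(i) * (x // 2)
--         res = half + res + half
--         i -= 1
--     return res
-- ===== Notes on version B (the rewrite author's own statement) =====
-- stated objective: alternative
-- what changed: Replaces A's staged construction (grow parallel head/footer index lists over three branches, append a central 0, then stitch on reversed(footer) and join) with an inside-out onion build: a single reverse fold that wraps the accumulator string with str(i)*(food[i]//2) on both sides around the central '0', so no mirror list and no reversed() pass exist at all.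
import Mathlib
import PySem

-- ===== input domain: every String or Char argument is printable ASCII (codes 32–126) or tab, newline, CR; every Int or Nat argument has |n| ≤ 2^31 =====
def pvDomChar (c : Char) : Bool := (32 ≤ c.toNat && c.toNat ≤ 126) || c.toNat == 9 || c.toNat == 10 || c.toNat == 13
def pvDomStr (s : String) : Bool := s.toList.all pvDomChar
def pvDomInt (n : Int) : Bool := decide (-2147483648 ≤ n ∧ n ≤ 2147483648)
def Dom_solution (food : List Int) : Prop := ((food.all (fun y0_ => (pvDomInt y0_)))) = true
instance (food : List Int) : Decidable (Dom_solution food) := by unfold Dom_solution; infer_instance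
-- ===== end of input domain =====

-- B builds the palindrome inside-out: one reverse fold wraps the accumulator string with
-- str(i)*(food[i]//2) on both sides around the central '0' — no mirror list, no reversed() pass
-- (objective: alternative).

-- ===== PORT A =====
-- inner `for z in range(…//2): head.append(index); footer.append(index)`
def solutionPush (m : Int) (idx : Int) (hf : List Int × List Int) : List Int × List Int :=
  (PySem.List.pyRange 0 m 1).foldl (fun p _ => (p.1 ++ [idx], p.2 ++ [idx])) hf

-- one iteration of A's `for i in food` loop on the state (head, footer, index)
def solutionStep (st : List Int × List Int × Int) (i : Int) : List Int × List Int × Int :=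
  if i ≤ 1 then (st.1, st.2.1, st.2.2 + 1)
  else if PySem.Int.mod i 2 = 1 then
    let i' := i - 1
    let p := solutionPush (PySem.Int.floordiv i' 2) st.2.2 (st.1, st.2.1)
    (p.1, p.2, st.2.2 + 1)
  else
    let p := solutionPush (PySem.Int.floordiv i 2) st.2.2 (st.1, st.2.1)
    (p.1, p.2, st.2.2 + 1)

def solution (food : List Int) : String :=
  let st := food.foldl solutionStep ([], [], 0)
  let head := st.1 ++ [(0 : Int)]
  let head := st.2.1.reverse.foldl (fun h x => h ++ [x]) head
  PySem.Str.join "" (head.map PySem.Int.toStr)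

-- ===== PORT B =====
-- `str(i) * (x // 2)` ported by hand as char-list repetition (exact: Python str*k
-- concatenates k copies and is "" for k ≤ 0, matching pyRepeat's toNat clamp).
-- B's `for x in reversed(food): res = half + res + half; i -= 1` is the fold below.
def solution_alt (food : List Int) : String :=
  let st := food.reverse.foldl
    (fun (st : String × Int) x =>
      let half := String.ofList (PySem.List.pyRepeat (PySem.Int.toChars st.2) (PySem.Int.floordiv x 2))
      (half ++ st.1 ++ half, st.2 - 1))
    ("0", (food.length : Int) - 1)
  st.1

-- ===== PRECONDITION & SPEC =====
def Spec_solution (food : List Int) (out : String) : Prop := out = solution_alt food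
instance (food : List Int) (out : String) : Decidable (Spec_solution food out) := by unfold Spec_solution; infer_instance

-- ===== CLAIM =====
def Claim_equal_solution : Prop := ∀ (food : List Int), Dom_solution food → Spec_solution food (solution food)

-- ===== LEMMAS AND PROOFS =====

-- the flat index list A accumulates (count is 0 when x ≤ 1)
def pvContrib : List Int → Int → List Int
  | [], _ => []
  | x :: xs, idx => List.replicate (PySem.Int.floordiv x 2).toNat idx ++ pvContrib xs (idx + 1)

-- the per-index char token both sides produce, and the token list starting at index s
def pvTok (x i : Int) : List Char :=
  PySem.List.pyRepeat (PySem.Int.toChars i) (PySem.Int.floordiv x 2)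

def pvToks : List Int → Int → List (List Char)
  | [], _ => []
  | x :: xs, i => pvTok x i :: pvToks xs (i + 1)

theorem pv_floordiv_two_nonpos (i : Int) (h : i ≤ 1) : (PySem.Int.floordiv i 2).toNat = 0 := by
  have h2 := PySem.Int.floordiv_mul_add_mod i 2
  have h3 : 0 ≤ PySem.Int.mod i 2 := PySem.Int.mod_nonneg _ (by norm_num)
  have h4 : PySem.Int.mod i 2 < 2 := PySem.Int.mod_lt _ (by norm_num)
  omega

theorem pv_floordiv_odd (i : Int) (h : PySem.Int.mod i 2 = 1) :
    PySem.Int.floordiv (i - 1) 2 = PySem.Int.floordiv i 2 := by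
  have h1 := PySem.Int.floordiv_mul_add_mod (i - 1) 2
  have h2 := PySem.Int.floordiv_mul_add_mod i 2
  have h3 : 0 ≤ PySem.Int.mod (i - 1) 2 := PySem.Int.mod_nonneg _ (by norm_num)
  have h4 : PySem.Int.mod (i - 1) 2 < 2 := PySem.Int.mod_lt _ (by norm_num)
  omega

theorem pv_foldl_pair {α : Type} (l : List α) (v : Int) (h f : List Int) :
    l.foldl (fun (p : List Int × List Int) _ => (p.1 ++ [v], p.2 ++ [v])) (h, f)
      = (h ++ List.replicate l.length v, f ++ List.replicate l.length v) := by
  induction l generalizing h f with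
  | nil => simp
  | cons x xs ih =>
    simp only [List.foldl_cons, ih, List.length_cons]
    simp [List.replicate_succ, List.append_assoc]

theorem pv_push (m v : Int) (h f : List Int) :
    solutionPush m v (h, f) = (h ++ List.replicate m.toNat v, f ++ List.replicate m.toNat v) := by
  unfold solutionPush
  rw [pv_foldl_pair]
  simp [PySem.List.length_pyRange_one]

theorem pv_foldA (xs : List Int) (h f : List Int) (idx : Int) :
    xs.foldl solutionStep (h, f, idx)
      = (h ++ pvContrib xs idx, f ++ pvContrib xs idx, idx + xs.length) := by
  induction xs generalizing h f idx with
  | nil => simp [pvContrib]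
  | cons x xs ih =>
    simp only [List.foldl_cons, pvContrib]
    by_cases hx : x ≤ 1
    · have hz := pv_floordiv_two_nonpos x hx
      simp only [solutionStep, if_pos hx]
      rw [ih, hz]
      simp only [List.replicate_zero, List.nil_append, List.length_cons, Prod.mk.injEq, true_and]
      omega
    · by_cases hm : PySem.Int.mod x 2 = 1
      · simp only [solutionStep, if_neg hx, if_pos hm, pv_push]
        rw [ih, pv_floordiv_odd x hm]
        simp [List.append_assoc]
        omega
      · simp only [solutionStep, if_neg hx, if_neg hm, pv_push]
        rw [ih]
        simp [List.append_assoc]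
        omega

theorem pv_flatten_intersperse_nil {α : Type} (parts : List (List α)) :
    (List.intersperse ([] : List α) parts).flatten = parts.flatten := by
  induction parts with
  | nil => rfl
  | cons p ps ih =>
    cases ps with
    | nil => rfl
    | cons q qs => simp_all [List.intersperse]

theorem pv_join_nil_flatten (parts : List (List Char)) :
    PySem.Chars.join [] parts = parts.flatten := by
  simp [PySem.Chars.join, List.intercalate, pv_flatten_intersperse_nil]

-- A's result, closed form: indices flattened, a central 0, the mirror
theorem pv_solution_eq (food : List Int) :
    solution food
      = PySem.Str.join ""
          (((pvContrib food 0 ++ [(0 : Int)]) ++ (pvContrib food 0).reverse).map PySem.Int.toStr) := by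
  simp only [solution]
  rw [pv_foldA food [] [] 0, PySem.List.foldl_append_singleton]
  simp only [List.nil_append]

theorem pv_replicate_tok (x i : Int) :
    ((List.replicate (PySem.Int.floordiv x 2).toNat i).map PySem.Int.toChars).flatten
      = pvTok x i := by
  simp [pvTok, PySem.List.pyRepeat, List.map_replicate]

theorem pv_contrib_flatten (xs : List Int) (s : Int) :
    ((pvContrib xs s).map PySem.Int.toChars).flatten = (pvToks xs s).flatten := by
  induction xs generalizing s with
  | nil => rfl
  | cons x xs ih =>
    simp only [pvContrib, pvToks, List.map_append, List.flatten_append, List.flatten_cons,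
      ih, pv_replicate_tok]

theorem pv_contrib_flatten_rev (xs : List Int) (s : Int) :
    (((pvContrib xs s).reverse).map PySem.Int.toChars).flatten
      = ((pvToks xs s).reverse).flatten := by
  induction xs generalizing s with
  | nil => rfl
  | cons x xs ih =>
    simp only [pvContrib, pvToks, List.reverse_append, List.reverse_cons, List.map_append,
      List.flatten_append, ih, List.reverse_replicate, pv_replicate_tok]
    simp

theorem pv_a_toList (food : List Int) :
    (solution food).toList
      = (pvToks food 0).flatten ++ ['0'] ++ ((pvToks food 0).reverse).flatten := by
  rw [pv_solution_eq, PySem.Str.toList_join]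
  rw [show ("".toList = ([] : List Char)) from rfl]
  simp only [List.map_map, List.map_append]
  have : (String.toList ∘ PySem.Int.toStr) = PySem.Int.toChars := by
    funext n; exact PySem.Int.toList_toStr n
  rw [this]
  simp only [pv_join_nil_flatten, List.flatten_append]
  rw [pv_contrib_flatten, pv_contrib_flatten_rev]
  simp [show PySem.Int.toChars 0 = ['0'] from by decide]

-- B's fold, characterised: over food.reverse it is a foldr over food
theorem pv_foldB (xs : List Int) (s : Int) :
    xs.reverse.foldl
      (fun (st : String × Int) x =>
        let half := String.ofList (PySem.List.pyRepeat (PySem.Int.toChars st.2) (PySem.Int.floordiv x 2))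
        (half ++ st.1 ++ half, st.2 - 1))
      ("0", s + (xs.length : Int) - 1)
      = (String.ofList ((pvToks xs s).flatten ++ ['0'] ++ ((pvToks xs s).reverse).flatten), s - 1) := by
  induction xs generalizing s with
  | nil => simp [pvToks]
  | cons x xs ih =>
    rw [List.reverse_cons, List.foldl_append]
    have hlen : s + ((x :: xs).length : Int) - 1 = (s + 1) + (xs.length : Int) - 1 := by
      simp [List.length_cons]
      ring
    rw [hlen, ih (s + 1)]
    simp only [List.foldl_cons, List.foldl_nil, add_sub_cancel_right, pvToks,
      List.flatten_cons, List.reverse_cons, List.flatten_append]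
    refine Prod.ext ?_ rfl
    apply String.toList_inj.mp
    simp [pvTok, List.append_assoc]

theorem pv_b_toList (food : List Int) :
    (solution_alt food).toList
      = (pvToks food 0).flatten ++ ['0'] ++ ((pvToks food 0).reverse).flatten := by
  unfold solution_alt
  have h : ((food.length : Int) - 1) = 0 + (food.length : Int) - 1 := by ring
  rw [h, pv_foldB food 0]
  simp

-- ===== VERDICT =====
theorem solution_spec : Claim_equal_solution := by
  intro food _
  unfold Spec_solution
  apply String.toList_inj.mp
  rw [pv_a_toList, pv_b_toList]
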